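-- pv_equiv track=rewrite | github.com/kuro961/AtCoder | AtCoderRegularContest141/A.py | get_ans
-- ===== SOURCE A (Python) =====
-- def make_divisors(n):
--     lower_divisors, upper_divisors = [], []
--     i = 1
--     while i * i <= n:
--         if n % i == 0:
--             lower_divisors.append(i)
--             if i != n // i:
--                 upper_divisors.append(n // i)
--         i += 1
--     return lower_divisors + upper_divisors[::-1]
--
-- def solve(N, str_N, r_num):
--     if int(str_N * r_num) <= N:
--         return int(str_N * r_num)
--     if str_N == "1":
--         return int("9" * (r_num - 1))
--     return int(str(int(str_N) - 1) * r_num)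
--
-- def get_ans(N):
--     str_N = str(N)
--     divs = make_divisors(len(str_N))
--     divs.remove(len(str_N))
--     ans = 0
--     for d in divs:
--         tmp = solve(N, str_N[:d], int(len(str_N) / d))
--         if tmp > ans:
--             ans = tmp
--     return ans
-- ===== SOURCE B (Python) =====
-- def get_ans(N):
--     s = str(N)
--     L = len(s)
--     ans = 0
--     for d in range(1, L):
--         if L % d == 0:
--             block = s[:d]
--             rep = L // d
--             cand = int(block * rep)
--             if cand > N:
--                 if block == "1":
--                     cand = int("9" * (rep - 1))
--                 else:
--                     cand = int(str(int(block) - 1) * rep)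
--             if cand > ans:
--                 ans = cand
--     return ans
-- ===== Notes on version B (the rewrite author's own statement) =====
-- stated objective: simpler
-- what changed: Replaced the sqrt-trial-division divisor builder (two lists stitched together, then list.remove) with a single linear scan d = 1..L-1 over the proper divisors of the digit count L, and inlined the solve helper into the loop.
import Mathlib
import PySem

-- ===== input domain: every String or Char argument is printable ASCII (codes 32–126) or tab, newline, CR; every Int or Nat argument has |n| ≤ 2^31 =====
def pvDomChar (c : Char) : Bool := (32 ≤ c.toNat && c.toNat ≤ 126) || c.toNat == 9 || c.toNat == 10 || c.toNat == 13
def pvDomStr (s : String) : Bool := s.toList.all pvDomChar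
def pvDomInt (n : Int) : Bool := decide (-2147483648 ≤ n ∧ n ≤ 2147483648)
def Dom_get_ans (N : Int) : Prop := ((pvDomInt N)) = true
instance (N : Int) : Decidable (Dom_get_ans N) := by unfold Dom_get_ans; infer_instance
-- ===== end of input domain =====

-- B replaces A's √-trial-division divisor builder (two lists stitched together, then list.remove)
-- with a single linear scan over the proper divisors of the digit count, inlining the solve helper;
-- objective: simpler.

-- ===== PORT A =====

-- Python's  s * k  for a string (k ≥ 0); exact hand port of string repetition.
def pyRep (cs : List Char) (k : Nat) : List Char := (List.replicate k cs).flatten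

-- the while-loop of make_divisors, state (i, lower_divisors, upper_divisors)
def mkDivLoop (n i : Nat) (lo hi : List Nat) : List Nat × List Nat :=
  if i * i ≤ n then
    if n % i = 0 then
      mkDivLoop n (i + 1) (lo ++ [i]) (if i ≠ n / i then hi ++ [n / i] else hi)
    else
      mkDivLoop n (i + 1) lo hi
  else (lo, hi)
termination_by n + 2 - i
decreasing_by
  all_goals
    rename_i h _
    rcases Nat.eq_zero_or_pos i with h0 | h0
    · omega
    · have : i * 1 ≤ i * i := Nat.mul_le_mul_left i h0
      omega

def make_divisors (n : Nat) : List Nat :=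
  let p := mkDivLoop n 1 [] []
  p.1 ++ p.2.reverse

-- the solve helper; int() is PySem.Int.ofChars? — under Pre_ (0 ≤ N) it never returns none,
-- the ValueError inputs (negative N, whose block str_N[:d] starts with '-') are excluded by Pre_.
def solveA (N : Int) (strN : List Char) (rnum : Nat) : Int :=
  let v := (PySem.Int.ofChars? (pyRep strN rnum)).getD 0
  if v ≤ N then v
  else if strN = ['1'] then (PySem.Int.ofChars? (pyRep ['9'] (rnum - 1))).getD 0
  else (PySem.Int.ofChars? (pyRep (PySem.Int.toChars ((PySem.Int.ofChars? strN).getD 0 - 1)) rnum)).getD 0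

def get_ans (N : Int) : Int :=
  let strN := PySem.Int.toChars N
  let L := strN.length
  -- divs.remove(len(str_N)): the ValueError branch is unreachable (L is always in make_divisors L, L ≥ 1)
  let divs := (PySem.List.remove? (make_divisors L) L).getD []
  -- str_N[:d] with d ≥ 0 is take d; int(len(str_N)/d) is L / d exactly, since d ∣ L makes the float division exact
  divs.foldl (fun ans d =>
    let tmp := solveA N (strN.take d) (L / d)
    if ans < tmp then tmp else ans) 0

-- ===== PORT B =====

def get_ans_alt (N : Int) : Int :=
  let s := PySem.Int.toChars N
  let L := s.length
  -- range(1, L)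
  (List.range' 1 (L - 1)).foldl (fun ans d =>
    if L % d = 0 then
      let block := s.take d
      let rep := L / d
      let cand := (PySem.Int.ofChars? (pyRep block rep)).getD 0
      let cand :=
        if N < cand then
          if block = ['1'] then (PySem.Int.ofChars? (pyRep ['9'] (rep - 1))).getD 0
          else (PySem.Int.ofChars? (pyRep (PySem.Int.toChars ((PySem.Int.ofChars? block).getD 0 - 1)) rep)).getD 0
        else cand
      if ans < cand then cand else ans
    else ans) 0

-- ===== PRECONDITION & SPEC =====
-- Pre_ excludes exactly the inputs where A raises: for every N < 0 the divisor d = 1 makes the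
-- block str_N[:1] = "-" and int("-" * r_num) raises ValueError.
def Pre_get_ans (N : Int) : Prop := 0 ≤ N
instance (N : Int) : Decidable (Pre_get_ans N) := by unfold Pre_get_ans; infer_instance
def pvWitness_get_ans : Int := 10

def Spec_get_ans (N : Int) (out : Int) : Prop := out = get_ans_alt N
instance (N : Int) (out : Int) : Decidable (Spec_get_ans N out) := by unfold Spec_get_ans; infer_instance

-- ===== CLAIM (what is proved, stated in full; the proofs are below) =====
def Claim_equal_get_ans : Prop := ∀ (N : Int), Dom_get_ans N → Pre_get_ans N → Spec_get_ans N (get_ans N)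

-- ===== LEMMAS AND PROOFS =====

-- closed form of the while-loop: it scans i = current .. √n
theorem mkDivLoop_spec (n : Nat) : ∀ (i : Nat) (lo hi : List Nat),
    mkDivLoop n i lo hi =
      (lo ++ (List.range' i (Nat.sqrt n + 1 - i)).filter (fun j => n % j == 0),
       hi ++ ((List.range' i (Nat.sqrt n + 1 - i)).filter
                (fun j => n % j == 0 && j != n / j)).map (n / ·)) := by
  intro i lo hi
  induction i, lo, hi using mkDivLoop.induct n with
  | case1 i lo hi hle hmod ih =>
    have hsq : i ≤ Nat.sqrt n := Nat.le_sqrt.mpr hle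
    have hr : List.range' i (Nat.sqrt n + 1 - i)
        = i :: List.range' (i + 1) (Nat.sqrt n + 1 - (i + 1)) := by
      have : Nat.sqrt n + 1 - i = (Nat.sqrt n + 1 - (i + 1)) + 1 := by omega
      rw [this, List.range'_succ]
    rw [mkDivLoop]; simp only [if_pos hle, if_pos hmod]
    simp only [dite_eq_ite] at ih
    rw [ih, hr]
    by_cases hne : i ≠ n / i <;> simp [hmod, hne]
  | case2 i lo hi hle hmod ih =>
    have hsq : i ≤ Nat.sqrt n := Nat.le_sqrt.mpr hle
    have hr : List.range' i (Nat.sqrt n + 1 - i)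
        = i :: List.range' (i + 1) (Nat.sqrt n + 1 - (i + 1)) := by
      have : Nat.sqrt n + 1 - i = (Nat.sqrt n + 1 - (i + 1)) + 1 := by omega
      rw [this, List.range'_succ]
    rw [mkDivLoop]; simp only [if_pos hle, if_neg hmod]
    rw [ih, hr]
    simp [hmod]
  | case3 i lo hi hle =>
    have hsq : Nat.sqrt n < i := by
      by_contra h; exact hle (Nat.le_sqrt.mp (by omega))
    rw [mkDivLoop]; simp only [if_neg hle]
    have : Nat.sqrt n + 1 - i = 0 := by omega
    simp [this]

-- a divisor j ≤ √n with j ≠ n/j has its cofactor strictly above √n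
theorem upper_gt_sqrt {n j : Nat} (h1 : 1 ≤ j) (h2 : j ≤ Nat.sqrt n) (hd : n % j = 0)
    (hne : j ≠ n / j) : Nat.sqrt n < n / j := by
  set s := Nat.sqrt n with hs
  set c := n / j with hc
  have hdvd : j ∣ n := Nat.dvd_of_mod_eq_zero hd
  have hjc : j * c = n := Nat.mul_div_cancel' hdvd
  have hss : s * s ≤ n := Nat.sqrt_le n
  have hs1 : 1 ≤ s := le_trans h1 h2
  by_contra hlt
  rw [not_lt] at hlt
  have hn2 : n ≤ s * s := by
    calc n = j * c := hjc.symm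
    _ ≤ s * s := Nat.mul_le_mul h2 hlt
  have heq : j * c = s * s := by omega
  have h4 : s ≤ j := by
    by_contra hj
    rw [not_le] at hj
    have e1 : j * c ≤ j * s := Nat.mul_le_mul (Nat.le_refl j) hlt
    have e2 : j * s < s * s := (Nat.mul_lt_mul_right hs1).mpr hj
    omega
  have h5 : j = s := le_antisymm h2 h4
  have h6 : c = s := by
    have : s * c = s * s := by rw [h5] at heq; exact heq
    exact Nat.eq_of_mul_eq_mul_left hs1 this
  exact hne (by omega)

-- the cofactor map is strictly antitone on divisors
theorem div_anti {n a b : Nat} (hn : 0 < n) (ha : 0 < a) (hab : a < b)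
    (hda : a ∣ n) (hdb : b ∣ n) : n / b < n / a := by
  have e1 : n / a * a = n := Nat.div_mul_cancel hda
  have e2 : n / b * b = n := Nat.div_mul_cancel hdb
  have hcb : 0 < n / b := Nat.div_pos (Nat.le_of_dvd hn hdb) (lt_trans ha hab)
  by_contra hle
  rw [not_lt] at hle
  have e3 : n / a * a ≤ n / b * a := Nat.mul_le_mul_right a hle
  have e4 : n / b * a < n / b * b := (Nat.mul_lt_mul_left hcb).mpr hab
  omega

-- A's divisor list is the ascending list of all divisors of n
theorem make_divisors_eq (n : Nat) :
    make_divisors n = (List.range' 1 n).filter (fun d => n % d == 0) := by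
  rcases Nat.eq_zero_or_pos n with hn | hn
  · subst hn; unfold make_divisors; rw [mkDivLoop]; norm_num
  set s := Nat.sqrt n with hs
  have hspec := mkDivLoop_spec n 1 [] []
  have hcnt : s + 1 - 1 = s := by omega
  rw [hcnt] at hspec
  set Lf := (List.range' 1 s).filter (fun j => n % j == 0) with hLf
  set Hf := (List.range' 1 s).filter (fun j => n % j == 0 && j != n / j) with hHf
  have hmk : make_divisors n = Lf ++ (Hf.map (n / ·)).reverse := by
    unfold make_divisors; rw [hspec]; simp
  rw [hmk]
  have memLf : ∀ x, x ∈ Lf ↔ 1 ≤ x ∧ x ≤ s ∧ n % x = 0 := by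
    intro x
    rw [hLf, List.mem_filter, List.mem_range'_1]
    simp; omega
  have memHf : ∀ x, x ∈ Hf ↔ 1 ≤ x ∧ x ≤ s ∧ n % x = 0 ∧ x ≠ n / x := by
    intro x
    rw [hHf, List.mem_filter, List.mem_range'_1]
    simp; omega
  have memT : ∀ x, x ∈ (List.range' 1 n).filter (fun d => n % d == 0) ↔
      1 ≤ x ∧ x ≤ n ∧ n % x = 0 := by
    intro x
    rw [List.mem_filter, List.mem_range'_1]
    simp; omega
  have hsn : s ≤ n := Nat.sqrt_le_self n
  have hub : ∀ y ∈ Hf.map (n / ·), s < y ∧ y ≤ n ∧ n % y = 0 := by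
    intro y hy
    rcases List.mem_map.mp hy with ⟨j, hj, rfl⟩
    rcases (memHf j).mp hj with ⟨h1, h2, h3, h4⟩
    have hdvd : j ∣ n := Nat.dvd_of_mod_eq_zero h3
    exact ⟨upper_gt_sqrt h1 h2 h3 h4, Nat.div_le_self n j,
      Nat.mod_eq_zero_of_dvd (Nat.div_dvd_of_dvd hdvd)⟩
  -- both sides are strictly increasing
  have pLf : List.Pairwise (· < ·) Lf :=
    List.Pairwise.sublist List.filter_sublist (List.pairwise_lt_range' 1)
  have pHf : List.Pairwise (· < ·) Hf :=
    List.Pairwise.sublist List.filter_sublist (List.pairwise_lt_range' 1)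
  have pMap : List.Pairwise (· > ·) (Hf.map (n / ·)) := by
    rw [List.pairwise_map]
    refine List.Pairwise.imp_of_mem ?_ pHf
    intro a b ha hb hab
    rcases (memHf a).mp ha with ⟨ha1, _, ha3, _⟩
    rcases (memHf b).mp hb with ⟨hb1, _, hb3, _⟩
    exact div_anti hn ha1 hab (Nat.dvd_of_mod_eq_zero ha3) (Nat.dvd_of_mod_eq_zero hb3)
  have pLHS : List.Pairwise (· < ·) (Lf ++ (Hf.map (n / ·)).reverse) := by
    rw [List.pairwise_append]
    refine ⟨pLf, ?_, ?_⟩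
    · rw [List.pairwise_reverse]; exact pMap
    · intro a ha b hb
      rcases (memLf a).mp ha with ⟨_, ha2, _⟩
      have := (hub b (List.mem_reverse.mp hb)).1
      omega
  have pT : List.Pairwise (· < ·) ((List.range' 1 n).filter (fun d => n % d == 0)) :=
    List.Pairwise.sublist List.filter_sublist (List.pairwise_lt_range' 1)
  -- same members
  have hmem : ∀ x, x ∈ Lf ++ (Hf.map (n / ·)).reverse ↔
      x ∈ (List.range' 1 n).filter (fun d => n % d == 0) := by
    intro x
    rw [List.mem_append, List.mem_reverse, memT x]
    constructor
    · rintro (hx | hx)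
      · rcases (memLf x).mp hx with ⟨h1, h2, h3⟩
        exact ⟨h1, le_trans h2 hsn, h3⟩
      · rcases hub x hx with ⟨h1, h2, h3⟩
        exact ⟨by omega, h2, h3⟩
    · rintro ⟨h1, h2, h3⟩
      by_cases hxs : x ≤ s
      · exact Or.inl ((memLf x).mpr ⟨h1, hxs, h3⟩)
      · rw [not_le] at hxs
        have hdvd : x ∣ n := Nat.dvd_of_mod_eq_zero h3
        set j := n / x with hj
        have hj1 : 1 ≤ j := Nat.div_pos (Nat.le_of_dvd hn hdvd) (by omega)
        have hjx : j * x = n := by rw [hj]; exact Nat.div_mul_cancel hdvd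
        have hjs : j ≤ s := by
          by_contra hjs
          rw [not_le] at hjs
          have e1 : (s + 1) * (s + 1) ≤ j * x := Nat.mul_le_mul (by omega) (by omega)
          have e2 : n < (s + 1) * (s + 1) := Nat.lt_succ_sqrt n
          omega
        have hjmod : n % j = 0 := Nat.mod_eq_zero_of_dvd (Nat.div_dvd_of_dvd hdvd)
        have hdivj : n / j = x := by rw [hj]; exact Nat.div_div_self hdvd (by omega)
        have hjne : j ≠ n / j := by rw [hdivj]; omega
        exact Or.inr (List.mem_map.mpr ⟨j, (memHf j).mpr ⟨hj1, hjs, hjmod, hjne⟩, hdivj⟩)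
  -- strictly increasing lists with the same members are equal
  have hnodL : (Lf ++ (Hf.map (n / ·)).reverse).Nodup := pLHS.imp (fun h => Nat.ne_of_lt h)
  have hnodT : ((List.range' 1 n).filter (fun d => n % d == 0)).Nodup :=
    pT.imp (fun h => Nat.ne_of_lt h)
  exact List.eq_of_perm_of_sorted (fun a b _ _ h1 h2 => le_antisymm h1 h2)
    (pLHS.imp (fun h => Nat.le_of_lt h)) (pT.imp (fun h => Nat.le_of_lt h))
    ((List.perm_ext_iff_of_nodup hnodL hnodT).mpr hmem)

theorem remove_append_last {p : List Nat} {v : Nat} (h : v ∉ p) :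
    PySem.List.remove? (p ++ [v]) v = some p := by
  induction p with
  | nil => simp
  | cons a t ih =>
    simp only [List.mem_cons, not_or] at h
    rw [List.cons_append, PySem.List.remove?_cons_of_ne _ (fun e => h.1 e.symm), ih h.2]
    rfl

-- after divs.remove(n): the proper divisors, which is exactly B's scan list
theorem remove_make_divisors (n : Nat) :
    (PySem.List.remove? (make_divisors n) n).getD []
      = (List.range' 1 (n - 1)).filter (fun d => n % d == 0) := by
  rw [make_divisors_eq]
  rcases Nat.eq_zero_or_pos n with hn | hn
  · subst hn; rfl
  have hr : List.range' 1 n = List.range' 1 (n - 1) ++ [n] := by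
    have h2 := List.range'_concat (s := 1) (n := n - 1) (step := 1)
    rw [show (n - 1) + 1 = n from by omega] at h2
    rw [h2]
    simp
    omega
  rw [hr, List.filter_append]
  have hfn : List.filter (fun d => n % d == 0) [n] = [n] := by simp
  rw [hfn]
  have hnot : n ∉ List.filter (fun d => n % d == 0) (List.range' 1 (n - 1)) := by
    intro hmem
    have := List.mem_range'_1.mp (List.mem_of_mem_filter hmem)
    omega
  rw [remove_append_last hnot]
  rfl

-- B's inlined candidate equals A's solve helper
theorem cand_eq (N : Int) (block : List Char) (rep : Nat) :
    (if N < (PySem.Int.ofChars? (pyRep block rep)).getD 0 then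
       if block = ['1'] then (PySem.Int.ofChars? (pyRep ['9'] (rep - 1))).getD 0
       else (PySem.Int.ofChars? (pyRep (PySem.Int.toChars ((PySem.Int.ofChars? block).getD 0 - 1)) rep)).getD 0
     else (PySem.Int.ofChars? (pyRep block rep)).getD 0) = solveA N block rep := by
  unfold solveA
  by_cases h : (PySem.Int.ofChars? (pyRep block rep)).getD 0 ≤ N
  · simp [h, not_lt.mpr h]
  · simp [h, not_le.mp h]

theorem get_ans_eq (N : Int) : get_ans N = get_ans_alt N := by
  unfold get_ans get_ans_alt
  dsimp only
  rw [remove_make_divisors]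
  rw [List.foldl_filter]
  apply PySem.List.foldl_congr_mem
  intro acc x hx
  by_cases hmod : (PySem.Int.toChars N).length % x = 0
  · simp only [hmod, if_pos, beq_iff_eq]
    rw [cand_eq]
  · simp [hmod]

-- ===== VERDICT (by name: the statement is the Claim_ definition above) =====
theorem get_ans_spec : Claim_equal_get_ans := by
  intro N _ _
  unfold Spec_get_ans
  exact get_ans_eq N
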